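-- pv_equiv track=rewrite | github.com/daymer/xWIKI_Karma | CustomModules/PageMechanics.py | set_space_and_nested_space
-- ===== SOURCE A (Python) =====
-- def set_space_and_nested_space(XWD_FULLNAME: str):
--     replaced_title = XWD_FULLNAME.replace('.WebHome', '')
--     replaced_title = replaced_title.replace('\\.', '<dirtyhack>')
--     array = replaced_title.split('.')
--     path_array = []
--     for each in array:
--         path_array.append(each.replace('<dirtyhack>', '\\.'))
--     return path_array
-- ===== SOURCE B (Python) =====
-- def set_space_and_nested_space(XWD_FULLNAME: str):
--     replaced = XWD_FULLNAME.replace('.WebHome', '')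
--     path_array = []
--     buf = []
--     i = 0
--     n = len(replaced)
--     while i < n:
--         c = replaced[i]
--         if c == '\\' and i + 1 < n and replaced[i + 1] == '.':
--             buf.append('\\.')
--             i += 2
--         elif c == '.':
--             path_array.append(''.join(buf))
--             buf = []
--             i += 1
--         else:
--             buf.append(c)
--             i += 1
--     path_array.append(''.join(buf))
--     return path_array
-- ===== Notes on version B (the rewrite author's own statement) =====
-- stated objective: alternative
-- what changed: Replaces A's three-pass sentinel pipeline (substitute '\.' by '<dirtyhack>', split on '.', restore the sentinel in every piece) with a single escape-aware left-to-right scan that builds the segments directly with a buffer.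
-- intended difference: On inputs whose '.WebHome'-stripped form contains the literal text '<dirtyhack>', A's internal sentinel leaks and A rewrites each such occurrence to '\.' (e.g. A('<dirtyhack>') = ['\\.']), while B returns those characters verbatim (['<dirtyhack>']), which is the intended parse of a title that happens to contain that text. — e.g. on set_space_and_nested_space("<dirtyhack>"): A returns ["\\."], B returns ["<dirtyhack>"]
import Mathlib
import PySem

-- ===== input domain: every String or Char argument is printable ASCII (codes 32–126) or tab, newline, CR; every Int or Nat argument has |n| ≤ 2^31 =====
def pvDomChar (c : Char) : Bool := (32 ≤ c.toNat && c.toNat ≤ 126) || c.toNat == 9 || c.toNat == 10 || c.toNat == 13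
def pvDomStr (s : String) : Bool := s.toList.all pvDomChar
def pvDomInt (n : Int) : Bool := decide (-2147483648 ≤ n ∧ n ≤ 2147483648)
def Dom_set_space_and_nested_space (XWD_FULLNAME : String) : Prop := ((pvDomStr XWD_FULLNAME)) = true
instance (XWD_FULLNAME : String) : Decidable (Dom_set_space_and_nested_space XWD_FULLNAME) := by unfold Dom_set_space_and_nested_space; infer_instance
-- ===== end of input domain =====

-- B replaces A's sentinel substitute/split/restore pipeline by a single escape-aware scan (alternative
-- decomposition); outside the sentinel-collision inputs described at D_ below the two agree everywhere.

-- ===== PORT A =====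
def set_space_and_nested_space (XWD_FULLNAME : String) : List String :=
  let replaced_title := PySem.Str.replace XWD_FULLNAME ".WebHome" ""
  let replaced_title := PySem.Str.replace replaced_title "\\." "<dirtyhack>"
  -- replaced_title.split('.'): the separator is the nonempty literal '.', so this is exactly
  -- PySem.Chars.splitOn on the code points, repacked as strings
  let array := (PySem.Chars.splitOn replaced_title.toList ['.']).map String.ofList
  List.foldl (fun path_array each => path_array ++ [PySem.Str.replace each "<dirtyhack>" "\\."]) [] array

-- ===== PORT B =====
-- the index/buffer while-loop of Source B: consume '\\' '.' as one escaped unit into the current buffer,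
-- an unescaped '.' closes the buffer, anything else is appended; the final buffer is pushed at the end
def pvAltScan : List Char → List Char → List String → List String
  | [], buf, path => path ++ [String.ofList buf]
  | '\\' :: '.' :: t, buf, path => pvAltScan t (buf ++ ['\\', '.']) path
  | '.' :: t, buf, path => pvAltScan t [] (path ++ [String.ofList buf])
  | c :: t, buf, path => pvAltScan t (buf ++ [c]) path

def set_space_and_nested_space_alt (XWD_FULLNAME : String) : List String :=
  let replaced := PySem.Str.replace XWD_FULLNAME ".WebHome" ""
  pvAltScan replaced.toList [] []

-- ===== PRECONDITION & SPEC =====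
-- On inputs whose '.WebHome'-stripped form contains the literal substring "<dirtyhack>", A's internal
-- sentinel leaks: A rewrites each such occurrence to "\.", while B keeps those characters verbatim,
-- which is the intended parse of a title that happens to contain that text.
def D_set_space_and_nested_space (XWD_FULLNAME : String) : Prop :=
  PySem.Str.isIn "<dirtyhack>" (PySem.Str.replace XWD_FULLNAME ".WebHome" "") = true
instance (XWD_FULLNAME : String) : Decidable (D_set_space_and_nested_space XWD_FULLNAME) := by
  unfold D_set_space_and_nested_space; infer_instance

def Spec_set_space_and_nested_space (XWD_FULLNAME : String) (out : List String) : Prop :=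
  ¬ D_set_space_and_nested_space XWD_FULLNAME → out = set_space_and_nested_space_alt XWD_FULLNAME
instance (XWD_FULLNAME : String) (out : List String) : Decidable (Spec_set_space_and_nested_space XWD_FULLNAME out) := by
  unfold Spec_set_space_and_nested_space; infer_instance

def pvDiffWitness_set_space_and_nested_space : String := "<dirtyhack>"
def pvDiffWitnessOut_set_space_and_nested_space : (List String) × (List String) :=
  (["\\."], ["<dirtyhack>"])

-- ===== CLAIM (what is proved, stated in full; the proofs are below) =====
def Claim_unchanged_set_space_and_nested_space : Prop := ∀ (XWD_FULLNAME : String), Dom_set_space_and_nested_space XWD_FULLNAME → Spec_set_space_and_nested_space XWD_FULLNAME (set_space_and_nested_space XWD_FULLNAME)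
def Claim_changed_set_space_and_nested_space : Prop := Dom_set_space_and_nested_space (pvDiffWitness_set_space_and_nested_space) ∧ D_set_space_and_nested_space (pvDiffWitness_set_space_and_nested_space) ∧ set_space_and_nested_space (pvDiffWitness_set_space_and_nested_space) = pvDiffWitnessOut_set_space_and_nested_space.1 ∧ set_space_and_nested_space_alt (pvDiffWitness_set_space_and_nested_space) = pvDiffWitnessOut_set_space_and_nested_space.2 ∧ pvDiffWitnessOut_set_space_and_nested_space.1 ≠ pvDiffWitnessOut_set_space_and_nested_space.2

-- ===== LEMMAS AND PROOFS =====

-- proof-side vocabulary: prepend to the first piece of a split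
def pvConsHead (u : List Char) (xs : List (List Char)) : List (List Char) :=
  (u ++ xs.headI) :: xs.tail

-- the sentinel, as an explicit character list
def pvS : List Char := ['<', 'd', 'i', 'r', 't', 'y', 'h', 'a', 'c', 'k', '>']

-- fuel-free characterisation of PySem.Chars.replace (for nonempty needle)
def pvRepC (old new : List Char) : List Char → List Char
  | [] => []
  | c :: t =>
    if old.isPrefixOf (c :: t) then new ++ pvRepC old new (t.drop (old.length - 1))
    else c :: pvRepC old new t
  termination_by l => l.length
  decreasing_by all_goals (simp; try omega)

-- fuel-free characterisation of PySem.Chars.splitOn (for nonempty separator)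
def pvSplC (sep : List Char) : List Char → List (List Char)
  | [] => [[]]
  | c :: t =>
    if sep.isPrefixOf (c :: t) then [] :: pvSplC sep (t.drop (sep.length - 1))
    else pvConsHead [c] (pvSplC sep t)
  termination_by l => l.length
  decreasing_by all_goals (simp; try omega)

-- the escape-aware split, head-prepend formulation
def pvEsplit : List Char → List (List Char)
  | [] => [[]]
  | '\\' :: '.' :: t => pvConsHead ['\\', '.'] (pvEsplit t)
  | '.' :: t => [] :: pvEsplit t
  | c :: t => pvConsHead [c] (pvEsplit t)

lemma pvConsHead_consHead (u v : List Char) (xs : List (List Char)) :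
    pvConsHead u (pvConsHead v xs) = pvConsHead (u ++ v) xs := by
  simp [pvConsHead]

lemma pvConsHead_nil_of_ne (xs : List (List Char)) (h : xs ≠ []) :
    pvConsHead [] xs = xs := by
  cases xs with
  | nil => exact absurd rfl h
  | cons a l => simp [pvConsHead]

lemma pvSplC_ne_nil (sep t : List Char) : pvSplC sep t ≠ [] := by
  rw [pvSplC.eq_def]
  split
  · simp
  · split <;> simp [pvConsHead]

lemma pvEsplit_ne_nil (t : List Char) : pvEsplit t ≠ [] := by
  rw [pvEsplit.eq_def]
  split <;> simp [pvConsHead]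

lemma pvRepC_pos (old new : List Char) (c : Char) (t : List Char)
    (h : old.isPrefixOf (c :: t) = true) :
    pvRepC old new (c :: t) = new ++ pvRepC old new (t.drop (old.length - 1)) := by
  rw [pvRepC, if_pos h]

lemma pvRepC_neg (old new : List Char) (c : Char) (t : List Char)
    (h : ¬ old.isPrefixOf (c :: t) = true) :
    pvRepC old new (c :: t) = c :: pvRepC old new t := by
  rw [pvRepC, if_neg h]

lemma pvRepC_prefix (old new h : List Char) (hold : old ≠ []) :
    pvRepC old new (old ++ h) = new ++ pvRepC old new h := by
  obtain ⟨o, os, rfl⟩ : ∃ o os, old = o :: os := by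
    cases old with
    | nil => exact absurd rfl hold
    | cons o os => exact ⟨o, os, rfl⟩
  rw [List.cons_append,
    pvRepC_pos _ _ _ _ (List.isPrefixOf_iff_prefix.mpr (by exact List.prefix_append _ _))]
  congr 1
  have hlen : (o :: os).length - 1 = os.length := by simp
  rw [hlen, List.drop_left]

lemma replace_go_eq (old new : List Char) (hold : old ≠ []) :
    ∀ (fuel : Nat) (l acc : List Char), l.length ≤ fuel →
      PySem.Chars.replace.go old new fuel l acc = acc.reverse ++ pvRepC old new l := by
  intro fuel
  induction fuel using Nat.strong_induction_on with
  | _ fuel IH =>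
    intro l acc hlen
    match fuel, l with
    | 0, l =>
      have hl : l = [] := by cases l <;> simp_all
      subst hl
      simp [PySem.Chars.replace.go, pvRepC]
    | Nat.succ fuel, [] =>
      simp [PySem.Chars.replace.go, pvRepC]
    | Nat.succ fuel, c :: t =>
      rw [PySem.Chars.replace.go]
      by_cases hpre : old.isPrefixOf (c :: t)
      · rw [if_pos hpre]
        obtain ⟨o, os, rfl⟩ : ∃ o os, old = o :: os := by
          cases old with
          | nil => exact absurd rfl hold
          | cons o os => exact ⟨o, os, rfl⟩
        have hdrop : List.drop (o :: os).length (c :: t) = t.drop ((o :: os).length - 1) := by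
          simp
        rw [hdrop, IH fuel (by omega) _ _ (by simp at hlen ⊢; omega)]
        rw [pvRepC_pos _ _ _ _ hpre]
        simp
      · rw [if_neg hpre, IH fuel (by omega) t _ (by simp at hlen ⊢; omega)]
        rw [pvRepC_neg _ _ _ _ hpre]
        simp

lemma replace_eq (old new l : List Char) (hold : old ≠ []) :
    PySem.Chars.replace l old new = pvRepC old new l := by
  rw [PySem.Chars.replace]
  rw [if_neg (by simpa using hold)]
  simpa using replace_go_eq old new hold l.length l [] le_rfl

lemma splitOn_go_eq (sep : List Char) (hsep : sep ≠ []) :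
    ∀ (fuel : Nat) (l cur : List Char) (acc : List (List Char)), l.length < fuel →
      PySem.Chars.splitOn.go sep fuel l cur acc =
        acc.reverse ++ pvConsHead cur.reverse (pvSplC sep l) := by
  intro fuel
  induction fuel using Nat.strong_induction_on with
  | _ fuel IH =>
    intro l cur acc hlen
    match fuel, l with
    | 0, l => omega
    | Nat.succ fuel, [] =>
      simp [PySem.Chars.splitOn.go, pvSplC, pvConsHead]
    | Nat.succ fuel, c :: t =>
      rw [PySem.Chars.splitOn.go]
      by_cases hpre : sep.isPrefixOf (c :: t)
      · rw [if_pos hpre]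
        obtain ⟨o, os, rfl⟩ : ∃ o os, sep = o :: os := by
          cases sep with
          | nil => exact absurd rfl hsep
          | cons o os => exact ⟨o, os, rfl⟩
        have hdrop : List.drop (o :: os).length (c :: t) = t.drop ((o :: os).length - 1) := by
          simp
        rw [hdrop, IH fuel (by omega) _ _ _ (by simp at hlen ⊢; omega)]
        rw [pvSplC, if_pos hpre]
        obtain ⟨x, xs, hX⟩ :=
          List.exists_cons_of_ne_nil (pvSplC_ne_nil (o :: os) (t.drop ((o :: os).length - 1)))
        rw [hX]
        simp [pvConsHead]
      · rw [if_neg hpre, IH fuel (by omega) t _ _ (by simp at hlen ⊢; omega)]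
        rw [pvSplC, if_neg hpre]
        rw [pvConsHead_consHead]
        simp

lemma splitOn_eq (sep l : List Char) (hsep : sep ≠ []) :
    PySem.Chars.splitOn l sep = pvSplC sep l := by
  rw [PySem.Chars.splitOn, splitOn_go_eq sep hsep (l.length + 1) l [] [] (by omega)]
  simp [pvConsHead_nil_of_ne _ (pvSplC_ne_nil _ _)]

-- equations of pvSplC at separator ['.']
lemma pvSplC_dot_dot (t : List Char) : pvSplC ['.'] ('.' :: t) = [] :: pvSplC ['.'] t := by
  rw [pvSplC, if_pos (by simp [List.isPrefixOf])]
  simp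

lemma pvSplC_dot_cons (c : Char) (t : List Char) (hc : c ≠ '.') :
    pvSplC ['.'] (c :: t) = pvConsHead [c] (pvSplC ['.'] t) := by
  rw [pvSplC, if_neg (by simp [List.isPrefixOf]; exact Ne.symm hc)]

lemma pvSplC_dot_append (u r : List Char) (hu : ∀ x ∈ u, x ≠ '.') :
    pvSplC ['.'] (u ++ r) = pvConsHead u (pvSplC ['.'] r) := by
  induction u with
  | nil => simp [pvConsHead_nil_of_ne _ (pvSplC_ne_nil _ _)]
  | cons c u ih =>
    have hc : c ≠ '.' := hu c (by simp)
    rw [List.cons_append, pvSplC_dot_cons c _ hc, ih (fun x hx => hu x (by simp [hx]))]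
    rw [pvConsHead_consHead]
    simp

lemma bs_prefix_iff (c : Char) (t : List Char) :
    (['\\', '.'].isPrefixOf (c :: t)) = true ↔ c = '\\' ∧ ∃ t', t = '.' :: t' := by
  cases t with
  | nil => simp [List.isPrefixOf]
  | cons d t' =>
    simp only [List.isPrefixOf, Bool.and_eq_true, beq_iff_eq]
    constructor
    · rintro ⟨rfl, rfl, -⟩
      exact ⟨rfl, t', rfl⟩
    · rintro ⟨rfl, t'', heq⟩
      cases heq
      simp

-- leading non-special characters of the first piece of the A-pipeline come from the input itself
lemma headI_pvConsHead (u : List Char) (xs : List (List Char)) :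
    (pvConsHead u xs).headI = u ++ xs.headI := rfl

lemma pvS_no_dot : ∀ x ∈ pvS, x ≠ '.' := by
  intro x hx
  simp only [pvS, List.mem_cons, List.not_mem_nil, or_false] at hx
  rcases hx with rfl|rfl|rfl|rfl|rfl|rfl|rfl|rfl|rfl|rfl|rfl <;> simp

lemma pvS_tail_ok :
    ∀ x ∈ (['d','i','r','t','y','h','a','c','k','>'] : List Char),
      x ≠ '\\' ∧ x ≠ '.' ∧ x ≠ '<' := by
  intro x hx
  simp only [List.mem_cons, List.not_mem_nil, or_false] at hx
  rcases hx with rfl|rfl|rfl|rfl|rfl|rfl|rfl|rfl|rfl|rfl <;> exact ⟨by simp, by simp, by simp⟩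

lemma pvHead_prefix_transfer (u : List Char)
    (hu : ∀ x ∈ u, x ≠ '\\' ∧ x ≠ '.' ∧ x ≠ '<') :
    ∀ t : List Char,
      u <+: (pvSplC ['.'] (pvRepC ['\\', '.'] pvS t)).headI → u <+: t := by
  induction u with
  | nil => intro t _; exact List.nil_prefix
  | cons d u ih =>
    have hd := hu d (by simp)
    have hu' : ∀ x ∈ u, x ≠ '\\' ∧ x ≠ '.' ∧ x ≠ '<' := fun x hx => hu x (by simp [hx])
    intro t hpre
    rcases t with _ | ⟨a, t⟩
    · rw [show pvRepC ['\\', '.'] pvS [] = [] from by rw [pvRepC]] at hpre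
      rw [show pvSplC ['.'] ([] : List Char) = [[]] from by rw [pvSplC]] at hpre
      simp at hpre
    · by_cases ha : a = '\\'
      · subst ha
        rcases t with _ | ⟨b, t⟩
        · have hnp : ¬ (['\\', '.'].isPrefixOf (['\\'] : List Char) = true) := by decide
          rw [pvRepC_neg _ _ _ _ hnp,
              show pvRepC ['\\', '.'] pvS [] = [] from by rw [pvRepC],
              pvSplC_dot_cons _ _ (by decide), headI_pvConsHead,
              List.singleton_append, List.cons_prefix_cons] at hpre
          exact absurd hpre.1 hd.1
        · by_cases hb : b = '.'
          · subst hb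
            have e1 : pvRepC ['\\', '.'] pvS ('\\' :: '.' :: t) =
                pvS ++ pvRepC ['\\', '.'] pvS t := by
              simpa only [List.cons_append, List.nil_append] using
                pvRepC_prefix ['\\', '.'] pvS t (by simp)
            rw [e1, pvSplC_dot_append pvS _ pvS_no_dot, headI_pvConsHead,
                show pvS = '<' :: ['d','i','r','t','y','h','a','c','k','>'] from rfl,
                List.cons_append, List.cons_prefix_cons] at hpre
            exact absurd hpre.1 hd.2.2
          · have hnp : ¬ (['\\', '.'].isPrefixOf ('\\' :: b :: t) = true) := by
              intro hp
              obtain ⟨-, t', ht'⟩ := (bs_prefix_iff _ _).mp hp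
              rw [List.cons.injEq] at ht'
              exact hb ht'.1
            rw [pvRepC_neg _ _ _ _ hnp, pvSplC_dot_cons _ _ (by decide), headI_pvConsHead,
                List.singleton_append, List.cons_prefix_cons] at hpre
            exact absurd hpre.1 hd.1
      · have hnp : ¬ (['\\', '.'].isPrefixOf (a :: t) = true) :=
          fun hp => ha ((bs_prefix_iff a t).mp hp).1
        by_cases hdot : a = '.'
        · subst hdot
          rw [pvRepC_neg _ _ _ _ hnp, pvSplC_dot_dot] at hpre
          simp at hpre
        · rw [pvRepC_neg _ _ _ _ hnp, pvSplC_dot_cons _ _ hdot, headI_pvConsHead,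
              List.singleton_append, List.cons_prefix_cons] at hpre
          exact (List.cons_prefix_cons).mpr ⟨hpre.1, ih hu' t hpre.2⟩

lemma pvEsplit_other (c : Char) (t : List Char)
    (h1 : ∀ t' : List Char, c = '\\' → t = '.' :: t' → False) (h2 : c = '.' → False) :
    pvEsplit (c :: t) = pvConsHead [c] (pvEsplit t) := by
  rw [pvEsplit.eq_def]
  split
  · simp_all
  · rename_i heq
    rw [List.cons.injEq] at heq
    exact absurd heq.2 (fun h => h1 _ heq.1 h)
  · rename_i heq
    rw [List.cons.injEq] at heq
    exact absurd heq.1 h2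
  · rename_i heq
    rw [List.cons.injEq] at heq
    rw [heq.1, heq.2]

-- the main fusion lemma: replace-split-restore equals the escape-aware split, away from sentinel collisions
lemma pvMain : ∀ t : List Char, ¬ (pvS <:+: t) →
    (pvSplC ['.'] (pvRepC ['\\', '.'] pvS t)).map (pvRepC pvS ['\\', '.']) = pvEsplit t := by
  intro t
  induction t using pvEsplit.induct with
  | case1 =>
    intro _
    rw [show pvRepC ['\\', '.'] pvS [] = [] from by rw [pvRepC],
        show pvSplC ['.'] ([] : List Char) = [[]] from by rw [pvSplC]]
    rw [pvEsplit]
    simp [show pvRepC pvS ['\\', '.'] [] = [] from by rw [pvRepC]]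
  | case2 t ih =>
    intro hni
    have hnt : ¬ (pvS <:+: t) := fun h => hni (List.infix_cons (List.infix_cons h))
    have e1 : pvRepC ['\\', '.'] pvS ('\\' :: '.' :: t) =
        pvS ++ pvRepC ['\\', '.'] pvS t := by
      simpa only [List.cons_append, List.nil_append] using
        pvRepC_prefix ['\\', '.'] pvS t (by simp)
    rw [e1, pvSplC_dot_append pvS _ pvS_no_dot]
    obtain ⟨x, xs, hX⟩ :=
      List.exists_cons_of_ne_nil (pvSplC_ne_nil ['.'] (pvRepC ['\\', '.'] pvS t))
    have hIH := ih hnt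
    rw [hX] at hIH ⊢
    rw [pvEsplit, ← hIH]
    simp only [pvConsHead, List.headI, List.tail, List.map]
    rw [pvRepC_prefix pvS ['\\', '.'] x (by simp [pvS])]
  | case3 t ih =>
    intro hni
    have hnt : ¬ (pvS <:+: t) := fun h => hni (List.infix_cons h)
    rw [pvRepC_neg _ _ _ _ (by rw [bs_prefix_iff]; rintro ⟨h, -⟩; cases h),
        pvSplC_dot_dot, pvEsplit]
    rw [List.map_cons, show pvRepC pvS ['\\', '.'] [] = [] from by rw [pvRepC], ih hnt]
  | case4 c t h1 h2 ih =>
    intro hni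
    have hnt : ¬ (pvS <:+: t) := fun h => hni (List.infix_cons h)
    have hcdot : c ≠ '.' := h2
    rw [pvRepC_neg _ _ _ _ (by rw [bs_prefix_iff]; rintro ⟨rfl, t', rfl⟩; exact h1 t' rfl rfl),
        pvSplC_dot_cons c _ hcdot]
    obtain ⟨x, xs, hX⟩ :=
      List.exists_cons_of_ne_nil (pvSplC_ne_nil ['.'] (pvRepC ['\\', '.'] pvS t))
    have hIH := ih hnt
    rw [hX] at hIH ⊢
    have hx_ne : ¬ (pvS.isPrefixOf (c :: x) = true) := by
      intro hpre
      rw [List.isPrefixOf_iff_prefix,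
          show pvS = '<' :: ['d','i','r','t','y','h','a','c','k','>'] from rfl,
          List.cons_prefix_cons] at hpre
      have hx : (['d','i','r','t','y','h','a','c','k','>'] : List Char) <+: t := by
        apply pvHead_prefix_transfer _ pvS_tail_ok t
        rw [hX]
        exact hpre.2
      apply hni
      apply List.IsPrefix.isInfix
      rw [show pvS = '<' :: ['d','i','r','t','y','h','a','c','k','>'] from rfl,
          List.cons_prefix_cons]
      exact ⟨hpre.1, hx⟩
    rw [pvEsplit_other c t h1 h2, ← hIH]
    simp only [pvConsHead, List.headI, List.tail, List.map, List.cons_append, List.nil_append]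
    rw [pvRepC_neg pvS ['\\', '.'] c x hx_ne]


lemma pvAltScan_eq : ∀ (l buf : List Char) (path : List String),
    pvAltScan l buf path = path ++ (pvConsHead buf (pvEsplit l)).map String.ofList := by
  intro l buf path
  induction l, buf, path using pvAltScan.induct with
  | case1 buf path => simp [pvAltScan, pvEsplit, pvConsHead]
  | case2 t buf path ih =>
    rw [pvAltScan, ih, pvEsplit, pvConsHead_consHead]
  | case3 t buf path ih =>
    rw [pvAltScan, ih, pvEsplit]
    rw [pvConsHead_nil_of_ne _ (pvEsplit_ne_nil t)]
    simp [pvConsHead]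
  | case4 c t buf path h1 h2 ih =>
    rw [pvAltScan, ih, pvEsplit_other c t h1 h2, pvConsHead_consHead]
    exact h1
    exact h2

lemma pvRestore_str (cs : List Char) :
    PySem.Str.replace (String.ofList cs) "<dirtyhack>" "\\." =
      String.ofList (pvRepC pvS ['\\', '.'] cs) := by
  apply String.toList_inj.mp
  rw [PySem.Str.toList_replace, String.toList_ofList, String.toList_ofList]
  rw [show ("\\." : String).toList = ['\\', '.'] from by decide]
  rw [show (['<','d','i','r','t','y','h','a','c','k','>'] : List Char) = pvS from rfl]
  rw [String.toList_ofList]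
  exact replace_eq pvS ['\\', '.'] cs (by simp [pvS])

-- ===== VERDICT (by name: the statements are the Claim_ definitions above) =====
theorem set_space_and_nested_space_spec : Claim_unchanged_set_space_and_nested_space := by
  intro s _ hnD
  have hinf : ¬ (pvS <:+: (PySem.Str.replace s ".WebHome" "").toList) := by
    intro h
    apply hnD
    unfold D_set_space_and_nested_space
    rw [PySem.Str.isIn_iff_infix,
        show ("<dirtyhack>" : String).toList = pvS from by decide]
    exact h
  show set_space_and_nested_space s = set_space_and_nested_space_alt s
  unfold set_space_and_nested_space set_space_and_nested_space_alt
  simp only []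
  rw [PySem.List.foldl_append_singleton_eq_map, List.nil_append]
  rw [PySem.Str.toList_replace,
      show ("\\." : String).toList = ['\\', '.'] from by decide,
      show ("<dirtyhack>" : String).toList = pvS from by decide,
      replace_eq _ _ _ (by simp),
      splitOn_eq _ _ (by simp)]
  rw [List.map_map, pvAltScan_eq, List.nil_append,
      pvConsHead_nil_of_ne _ (pvEsplit_ne_nil _), ← pvMain _ hinf, List.map_map]
  apply List.map_congr_left
  intro cs _
  exact pvRestore_str cs

theorem set_space_and_nested_space_changed : Claim_changed_set_space_and_nested_space := by
  unfold Claim_changed_set_space_and_nested_space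
  exact ⟨by decide, by decide, by decide, by decide, by decide⟩
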